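-- pv_equiv track=rewrite | github.com/Drumil59/Vortex-Skeleton | core/attack_chain_engine.py | generate_chains
-- ===== SOURCE A (Python) =====
-- from typing import List, Dict, Any
--
-- def generate_chains(triaged_findings: Dict[str, List[Dict[str, Any]]]) -> List[str]:
--     chains = []
--     all_vulns = []
--
--     for sev, items in triaged_findings.items():
--         all_vulns.extend(items)
--
--     titles = [v.get('title', '').lower() for v in all_vulns]
--     endpoints = [v.get('endpoint', '').lower() for v in all_vulns]
--
--     # 1. IDOR -> Privilege Escalation
--     if any('idor' in t for t in titles) and any('admin' in e or 'user' in e for e in endpoints):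
--         chains.append("Possible Chain: IDOR detected near administrative endpoints. Attempt Privilege Escalation by modifying object references.")
--
--     # 2. XSS -> Session Hijacking / CSRF Bypass
--     if any('xss' in t for t in titles) and any('csrf' in t for t in titles):
--         chains.append("Possible Chain: Reflected/Stored XSS found alongside CSRF weakness. Use XSS to bypass CSRF tokens and force state changes.")
--
--     # 3. SSRF -> Internal Pivoting
--     if any('ssrf' in t for t in titles):
--         chains.append("Possible Chain: SSRF vulnerability detected. Attempt to pivot to internal network (e.g., AWS Metadata, internal admin panels).")
--
--     # 4. Open Redirect -> OAuth Token Stealing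
--     if any('open redirect' in t for t in titles) and any('oauth' in e or 'login' in e for e in endpoints):
--         chains.append("Possible Chain: Open Redirect on authentication flow. Attempt to steal OAuth tokens or craft sophisticated phishing links.")
--
--     return chains
-- ===== SOURCE B (Python) =====
-- def generate_chains(triaged_findings):
--     has_idor = has_xss = has_csrf = has_ssrf = has_redir = False
--     has_admin_user = has_oauth_login = False
--
--     for items in triaged_findings.values():
--         for v in items:
--             t = v.get('title', '').lower()
--             e = v.get('endpoint', '').lower()
--             if 'idor' in t:
--                 has_idor = True
--             if 'xss' in t:
--                 has_xss = True
--             if 'csrf' in t: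
--                 has_csrf = True
--             if 'ssrf' in t:
--                 has_ssrf = True
--             if 'open redirect' in t:
--                 has_redir = True
--             if 'admin' in e or 'user' in e:
--                 has_admin_user = True
--             if 'oauth' in e or 'login' in e:
--                 has_oauth_login = True
--
--     chains = []
--     if has_idor and has_admin_user:
--         chains.append("Possible Chain: IDOR detected near administrative endpoints. Attempt Privilege Escalation by modifying object references.")
--     if has_xss and has_csrf:
--         chains.append("Possible Chain: Reflected/Stored XSS found alongside CSRF weakness. Use XSS to bypass CSRF tokens and force state changes.")
--     if has_ssrf:
--         chains.append("Possible Chain: SSRF vulnerability detected. Attempt to pivot to internal network (e.g., AWS Metadata, internal admin panels).")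
--     if has_redir and has_oauth_login:
--         chains.append("Possible Chain: Open Redirect on authentication flow. Attempt to steal OAuth tokens or craft sophisticated phishing links.")
--     return chains
-- ===== Notes on version B (the rewrite author's own statement) =====
-- stated objective: simpler
-- what changed: Replaces the materialised all_vulns/titles/endpoints lists and the repeated any() scans with a single flag-setting pass over the findings followed by four constant-time checks.
import Mathlib
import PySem

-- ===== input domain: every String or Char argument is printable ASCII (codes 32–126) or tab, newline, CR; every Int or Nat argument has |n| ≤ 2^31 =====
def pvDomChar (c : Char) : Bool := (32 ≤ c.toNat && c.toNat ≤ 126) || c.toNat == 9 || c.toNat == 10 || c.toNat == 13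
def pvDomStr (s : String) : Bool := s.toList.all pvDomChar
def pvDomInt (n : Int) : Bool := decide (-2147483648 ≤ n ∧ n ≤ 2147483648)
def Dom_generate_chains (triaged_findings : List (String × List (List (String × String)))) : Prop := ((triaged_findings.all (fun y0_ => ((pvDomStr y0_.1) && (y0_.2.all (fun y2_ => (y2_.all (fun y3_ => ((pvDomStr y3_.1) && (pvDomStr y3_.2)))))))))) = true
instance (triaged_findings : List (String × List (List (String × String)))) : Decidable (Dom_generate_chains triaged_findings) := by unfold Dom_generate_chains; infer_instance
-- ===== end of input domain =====

-- B rewrites A's four repeated any() scans over materialised title/endpoint lists as one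
-- flag-accumulating pass over the findings (objective: simpler, O(1) extra state).

-- ===== PORT A =====
-- v.get(k, '') on the association-list dict
def pvGetD (v : List (String × String)) (k : String) : String :=
  (PySem.Dict.mk v).getD k ""

def chainMsg1 : String := "Possible Chain: IDOR detected near administrative endpoints. Attempt Privilege Escalation by modifying object references."
def chainMsg2 : String := "Possible Chain: Reflected/Stored XSS found alongside CSRF weakness. Use XSS to bypass CSRF tokens and force state changes."
def chainMsg3 : String := "Possible Chain: SSRF vulnerability detected. Attempt to pivot to internal network (e.g., AWS Metadata, internal admin panels)."
def chainMsg4 : String := "Possible Chain: Open Redirect on authentication flow. Attempt to steal OAuth tokens or craft sophisticated phishing links."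

def generate_chains (triaged_findings : List (String × List (List (String × String)))) : List String :=
  let chains : List String := []
  let all_vulns : List (List (String × String)) :=
    triaged_findings.foldl (fun acc p => acc ++ p.2) []
  let titles := all_vulns.map (fun v => PySem.Str.lower (pvGetD v "title"))
  let endpoints := all_vulns.map (fun v => PySem.Str.lower (pvGetD v "endpoint"))
  let chains := if titles.any (fun t => PySem.Str.isIn "idor" t)
                  && endpoints.any (fun e => PySem.Str.isIn "admin" e || PySem.Str.isIn "user" e)
                then chains ++ [chainMsg1] else chains
  let chains := if titles.any (fun t => PySem.Str.isIn "xss" t)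
                  && titles.any (fun t => PySem.Str.isIn "csrf" t)
                then chains ++ [chainMsg2] else chains
  let chains := if titles.any (fun t => PySem.Str.isIn "ssrf" t)
                then chains ++ [chainMsg3] else chains
  let chains := if titles.any (fun t => PySem.Str.isIn "open redirect" t)
                  && endpoints.any (fun e => PySem.Str.isIn "oauth" e || PySem.Str.isIn "login" e)
                then chains ++ [chainMsg4] else chains
  chains

-- ===== PORT B =====
-- flags: (has_idor, has_xss, has_csrf, has_ssrf, has_redir, has_admin_user, has_oauth_login)
def altFlags := Bool × Bool × Bool × Bool × Bool × Bool × Bool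

def altStep (st : altFlags) (v : List (String × String)) : altFlags :=
  let t := PySem.Str.lower (pvGetD v "title")
  let e := PySem.Str.lower (pvGetD v "endpoint")
  ((if PySem.Str.isIn "idor" t then true else st.1),
   (if PySem.Str.isIn "xss" t then true else st.2.1),
   (if PySem.Str.isIn "csrf" t then true else st.2.2.1),
   (if PySem.Str.isIn "ssrf" t then true else st.2.2.2.1),
   (if PySem.Str.isIn "open redirect" t then true else st.2.2.2.2.1),
   (if PySem.Str.isIn "admin" e || PySem.Str.isIn "user" e then true else st.2.2.2.2.2.1),
   (if PySem.Str.isIn "oauth" e || PySem.Str.isIn "login" e then true else st.2.2.2.2.2.2))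

def generate_chains_alt (triaged_findings : List (String × List (List (String × String)))) : List String :=
  let st : altFlags :=
    triaged_findings.foldl (fun st p => p.2.foldl altStep st)
      (false, false, false, false, false, false, false)
  let chains : List String := []
  let chains := if st.1 && st.2.2.2.2.2.1 then chains ++ [chainMsg1] else chains
  let chains := if st.2.1 && st.2.2.1 then chains ++ [chainMsg2] else chains
  let chains := if st.2.2.2.1 then chains ++ [chainMsg3] else chains
  let chains := if st.2.2.2.2.1 && st.2.2.2.2.2.2 then chains ++ [chainMsg4] else chains
  chains

-- ===== PRECONDITION & SPEC =====
def Spec_generate_chains (triaged_findings : List (String × List (List (String × String)))) (out : List String) : Prop := out = generate_chains_alt triaged_findings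
instance (triaged_findings : List (String × List (List (String × String)))) (out : List String) : Decidable (Spec_generate_chains triaged_findings out) := by unfold Spec_generate_chains; infer_instance

-- ===== CLAIM (what is proved, stated in full; the proofs are below) =====
def Claim_equal_generate_chains : Prop := ∀ (triaged_findings : List (String × List (List (String × String)))), Dom_generate_chains triaged_findings → Spec_generate_chains triaged_findings (generate_chains triaged_findings)

-- ===== LEMMAS AND PROOFS =====

def pT (pat : String) (v : List (String × String)) : Bool :=
  PySem.Str.isIn pat (PySem.Str.lower (pvGetD v "title"))
def pE (pat₁ pat₂ : String) (v : List (String × String)) : Bool :=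
  PySem.Str.isIn pat₁ (PySem.Str.lower (pvGetD v "endpoint"))
    || PySem.Str.isIn pat₂ (PySem.Str.lower (pvGetD v "endpoint"))

lemma altStep_foldl (vulns : List (List (String × String))) (st : altFlags) :
    vulns.foldl altStep st =
      (st.1 || vulns.any (pT "idor"),
       st.2.1 || vulns.any (pT "xss"),
       st.2.2.1 || vulns.any (pT "csrf"),
       st.2.2.2.1 || vulns.any (pT "ssrf"),
       st.2.2.2.2.1 || vulns.any (pT "open redirect"),
       st.2.2.2.2.2.1 || vulns.any (pE "admin" "user"),
       st.2.2.2.2.2.2 || vulns.any (pE "oauth" "login")) := by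
  induction vulns generalizing st with
  | nil => simp
  | cons v vs ih =>
      obtain ⟨a, b, c, d, e, f, g⟩ := st
      simp only [List.foldl_cons, ih, altStep, List.any_cons, pT, pE]
      refine Prod.ext ?_ (Prod.ext ?_ (Prod.ext ?_ (Prod.ext ?_ (Prod.ext ?_ (Prod.ext ?_ ?_))))) <;>
        simp [Bool.or_comm, Bool.or_left_comm]

lemma alt_outer_foldl (tf : List (String × List (List (String × String)))) (st : altFlags) :
    tf.foldl (fun st p => p.2.foldl altStep st) st =
      (st.1 || (tf.flatMap Prod.snd).any (pT "idor"),
       st.2.1 || (tf.flatMap Prod.snd).any (pT "xss"),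
       st.2.2.1 || (tf.flatMap Prod.snd).any (pT "csrf"),
       st.2.2.2.1 || (tf.flatMap Prod.snd).any (pT "ssrf"),
       st.2.2.2.2.1 || (tf.flatMap Prod.snd).any (pT "open redirect"),
       st.2.2.2.2.2.1 || (tf.flatMap Prod.snd).any (pE "admin" "user"),
       st.2.2.2.2.2.2 || (tf.flatMap Prod.snd).any (pE "oauth" "login")) := by
  induction tf generalizing st with
  | nil => simp
  | cons p ps ih =>
      rw [List.foldl_cons, altStep_foldl, ih]
      simp [List.flatMap_cons, List.any_append, Bool.or_assoc]

lemma a_all_vulns (tf : List (String × List (List (String × String)))) :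
    tf.foldl (fun acc p => acc ++ p.2) ([] : List (List (String × String))) =
      tf.flatMap Prod.snd := by
  have h : ∀ (acc : List (List (String × String))),
      tf.foldl (fun acc p => acc ++ p.2) acc = acc ++ tf.flatMap Prod.snd := by
    induction tf with
    | nil => simp
    | cons p ps ih => intro acc; simp [List.foldl_cons, ih, List.flatMap_cons]
  simpa using h []

-- ===== VERDICT (by name: the statement is the Claim_ definition above) =====
theorem generate_chains_spec : Claim_equal_generate_chains := by
  intro tf _
  show generate_chains tf = generate_chains_alt tf
  simp only [generate_chains, generate_chains_alt, a_all_vulns, alt_outer_foldl,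
    List.any_map, Function.comp_def, Bool.false_or]
  rfl
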